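-- pv_equiv track=rewrite | github.com/Skyscanner/turbolift | data_governance/scripts/cf_script.py | _json_obj_end
-- ===== SOURCE A (Python) =====
-- def _json_obj_end(lines, start_idx):
--     end, depth = start_idx + 1, 1
--     while end < len(lines):
--         depth += lines[end].count("{")
--         depth -= lines[end].count("}")
--         if depth == 0:
--             return end
--         end += 1
--     return None
-- ===== SOURCE B (Python) =====
-- def _json_obj_end(lines, start_idx):
--     # Scan-then-find: build the running-depth prefix list, then return the
--     # first index whose running depth is zero.
--     idxs = list(range(start_idx + 1, len(lines)))
--     depths = [1]
--     for i in idxs: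
--         depths.append(depths[-1] + lines[i].count("{") - lines[i].count("}"))
--     for i, d in zip(idxs, depths[1:]):
--         if d == 0:
--             return i
--     return None
-- ===== Notes on version B (the rewrite author's own statement) =====
-- stated objective: alternative
-- what changed: Replaces the index-mutating while loop with early return by a scan-then-find decomposition: first build the full list of running depths (prefix sums of per-line brace deltas), then search that list for the first zero.
import Mathlib
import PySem

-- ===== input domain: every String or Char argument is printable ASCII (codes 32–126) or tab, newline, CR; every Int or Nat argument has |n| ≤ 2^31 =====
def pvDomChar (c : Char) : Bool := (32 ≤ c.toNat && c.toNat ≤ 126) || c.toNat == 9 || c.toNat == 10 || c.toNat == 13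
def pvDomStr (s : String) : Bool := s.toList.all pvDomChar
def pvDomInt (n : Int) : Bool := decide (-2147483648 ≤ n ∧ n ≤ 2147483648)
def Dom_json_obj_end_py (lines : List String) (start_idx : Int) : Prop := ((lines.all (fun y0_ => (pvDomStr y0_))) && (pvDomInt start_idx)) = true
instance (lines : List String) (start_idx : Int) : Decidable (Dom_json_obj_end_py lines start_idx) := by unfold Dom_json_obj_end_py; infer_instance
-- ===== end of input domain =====

-- B replaces A's index-mutating while loop (early return) by a scan-then-find
-- decomposition: build the full running-depth prefix list, then find its first zero.


-- ===== PORT A =====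
-- while loop: fuel = number of remaining iterations (len(lines) - end);
-- lines[end] via pyGet? (none = IndexError, excluded by Pre_).
def jsonObjEndLoopA (lines : List String) (endIdx depth : Int) : Nat → Option Int
  | 0 => none
  | fuel + 1 =>
    match PySem.List.pyGet? lines endIdx with
    | none => none
    | some line =>
      let depth' := depth + (PySem.Str.count line "{" : Int) - (PySem.Str.count line "}" : Int)
      if depth' = 0 then some endIdx
      else jsonObjEndLoopA lines (endIdx + 1) depth' fuel

def json_obj_end_py (lines : List String) (start_idx : Int) : Option Int :=
  jsonObjEndLoopA lines (start_idx + 1) 1 (((lines.length : Int) - (start_idx + 1)).toNat)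

-- ===== PORT B =====
def jsonBraceDelta (o : Option String) : Int :=
  match o with
  | none => 0   -- Python raises here; excluded by Pre_
  | some line => (PySem.Str.count line "{" : Int) - (PySem.Str.count line "}" : Int)

def json_obj_end_py_alt (lines : List String) (start_idx : Int) : Option Int :=
  let idxs := PySem.List.pyRange (start_idx + 1) (lines.length : Int) 1
  let depths := idxs.foldl
    (fun acc i => acc ++ [acc.getLast! + jsonBraceDelta (PySem.List.pyGet? lines i)]) [(1 : Int)]
  ((idxs.zip (depths.drop 1)).find? (fun p => p.2 == 0)).map Prod.fst

-- ===== PRECONDITION & SPEC =====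
-- Pre_ excludes exactly the inputs where Python A raises IndexError: a scan
-- position below -len(lines) (negative indexing out of range).
def Pre_json_obj_end_py (lines : List String) (start_idx : Int) : Prop :=
  -(lines.length : Int) ≤ start_idx + 1
instance (lines : List String) (start_idx : Int) : Decidable (Pre_json_obj_end_py lines start_idx) := by unfold Pre_json_obj_end_py; infer_instance

def pvWitness_json_obj_end_py : List String × Int := (["{", "a}", "}"], -1)

def Spec_json_obj_end_py (lines : List String) (start_idx : Int) (out : Option Int) : Prop := out = json_obj_end_py_alt lines start_idx
instance (lines : List String) (start_idx : Int) (out : Option Int) : Decidable (Spec_json_obj_end_py lines start_idx out) := by unfold Spec_json_obj_end_py; infer_instance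

-- ===== CLAIM (what is proved, stated in full; the proofs are below) =====
def Claim_equal_json_obj_end_py : Prop := ∀ (lines : List String) (start_idx : Int), Dom_json_obj_end_py lines start_idx → Pre_json_obj_end_py lines start_idx → Spec_json_obj_end_py lines start_idx (json_obj_end_py lines start_idx)

-- ===== LEMMAS AND PROOFS =====

-- abbreviation for B's fold step
def jsonStep (lines : List String) : List Int → Int → List Int :=
  fun acc i => acc ++ [acc.getLast! + jsonBraceDelta (PySem.List.pyGet? lines i)]

theorem jsonStep_shift (lines : List String) (is : List Int) :
    ∀ (pref : List Int) (x : Int),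
      is.foldl (jsonStep lines) (pref ++ [x]) = pref ++ is.foldl (jsonStep lines) [x] := by
  induction is with
  | nil => intro pref x; simp
  | cons i is ih =>
    intro pref x
    have h1 : jsonStep lines (pref ++ [x]) i
        = (pref ++ [x]) ++ [x + jsonBraceDelta (PySem.List.pyGet? lines i)] := by
      simp [jsonStep]
    have h2 : jsonStep lines [x] i = [x] ++ [x + jsonBraceDelta (PySem.List.pyGet? lines i)] := by
      simp [jsonStep]
    simp only [List.foldl_cons, h1, h2]
    rw [ih ((pref ++ [x])) _, ih [x] _]
    simp

theorem jsonStep_head (lines : List String) (is : List Int) (x : Int) :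
    is.foldl (jsonStep lines) [x]
      = x :: (is.foldl (jsonStep lines) [x]).drop 1 := by
  cases is with
  | nil => rfl
  | cons i is =>
    have h2 : jsonStep lines [x] i = [x] ++ [x + jsonBraceDelta (PySem.List.pyGet? lines i)] := by
      simp [jsonStep]
    simp only [List.foldl_cons, h2]
    rw [jsonStep_shift lines is [x] _]
    simp

theorem json_loop_eq (lines : List String) :
    ∀ (fuel : Nat) (e depth : Int),
      -(lines.length : Int) ≤ e → fuel = ((lines.length : Int) - e).toNat →
      jsonObjEndLoopA lines e depth fuel
        = (((PySem.List.pyRange e (lines.length : Int) 1).zip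
            (((PySem.List.pyRange e (lines.length : Int) 1).foldl (jsonStep lines) [depth]).drop 1)).find?
            (fun p => p.2 == 0)).map Prod.fst := by
  intro fuel
  induction fuel with
  | zero =>
    intro e depth _ hfuel
    have hge : (lines.length : Int) ≤ e := by omega
    rw [PySem.List.pyRange_one_eq_nil hge]
    simp [jsonObjEndLoopA]
  | succ fuel ih =>
    intro e depth hlo hfuel
    have hlt : e < (lines.length : Int) := by omega
    have hinr : PySem.Raise.InRange lines.length e := by
      constructor <;> omega
    obtain ⟨line, hget⟩ : ∃ l, PySem.List.pyGet? lines e = some l := by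
      cases hg : PySem.List.pyGet? lines e with
      | none => exact absurd (((PySem.List.pyGet?_eq_none_iff _ _).mp hg)) (by simp [hinr])
      | some l => exact ⟨l, rfl⟩
    rw [PySem.List.pyRange_one_cons hlt]
    set r' := PySem.List.pyRange (e + 1) (lines.length : Int) 1 with hr'
    set depth' := depth + (PySem.Str.count line "{" : Int) - (PySem.Str.count line "}" : Int)
      with hdepth'
    have hstep : jsonStep lines [depth] e = [depth] ++ [depth'] := by
      simp [jsonStep, hget, jsonBraceDelta, hdepth']
      ring
    have hfold : (e :: r').foldl (jsonStep lines) [depth]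
        = [depth] ++ r'.foldl (jsonStep lines) [depth'] := by
      simp only [List.foldl_cons, hstep]
      exact jsonStep_shift lines r' [depth] depth'
    rw [hfold]
    simp only [List.singleton_append, List.drop_succ_cons, List.drop_zero]
    rw [jsonStep_head lines r' depth']
    simp only [List.zip_cons_cons, List.find?_cons]
    unfold jsonObjEndLoopA
    rw [hget]
    simp only [← hdepth']
    by_cases h0 : depth' = 0
    · rw [if_pos h0]
      simp [h0]
    · have hbeq : (depth' == (0:Int)) = false := by simp [h0]
      rw [if_neg h0]
      simp only [hbeq]
      rw [ih (e + 1) depth' (by omega) (by omega)]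

-- ===== VERDICT (by name: the statement is the Claim_ definition above) =====
theorem json_obj_end_py_spec : Claim_equal_json_obj_end_py := by
  intro lines start_idx _ hpre
  unfold Spec_json_obj_end_py json_obj_end_py json_obj_end_py_alt
  exact json_loop_eq lines _ (start_idx + 1) 1 hpre rfl
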